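-- pv_equiv track=rewrite | github.com/MajestyV/Calculator | XRD.py | CrystalPlaneFamily
-- ===== SOURCE A (Python) =====
-- def CrystalPlaneFamily(h_max,k_max,l_max):
--     hkl = []
--     for h in range(h_max+1):
--         for k in range(k_max+1):
--             for l in range(l_max+1):
--                 if [h,k,l] != [0,0,0]:
--                     hkl.append([h,k,l])
--     return hkl
-- ===== SOURCE B (Python) =====
-- def CrystalPlaneFamily(h_max, k_max, l_max):
--     # Mixed-radix index decoding: triple i (in lexicographic order) has rank
--     # i = h*K*L + k*L + l, so decode each rank 1..H*K*L-1 directly, skipping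
--     # rank 0 = [0,0,0].  No nested loops at all.
--     H, K, L = h_max + 1, k_max + 1, l_max + 1
--     if H <= 0 or K <= 0 or L <= 0:
--         return []
--     return [[i // (K * L), (i // L) % K, i % L] for i in range(1, H * K * L)]
-- ===== Notes on version B (the rewrite author's own statement) =====
-- stated objective: alternative
-- what changed: B replaces A's three nested loops with a per-element guard by a single flat loop over ranks 1..H*K*L-1 that decodes each rank into (h,k,l) by mixed-radix division/modulo, skipping rank 0 = [0,0,0] by starting at 1.
import Mathlib
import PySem

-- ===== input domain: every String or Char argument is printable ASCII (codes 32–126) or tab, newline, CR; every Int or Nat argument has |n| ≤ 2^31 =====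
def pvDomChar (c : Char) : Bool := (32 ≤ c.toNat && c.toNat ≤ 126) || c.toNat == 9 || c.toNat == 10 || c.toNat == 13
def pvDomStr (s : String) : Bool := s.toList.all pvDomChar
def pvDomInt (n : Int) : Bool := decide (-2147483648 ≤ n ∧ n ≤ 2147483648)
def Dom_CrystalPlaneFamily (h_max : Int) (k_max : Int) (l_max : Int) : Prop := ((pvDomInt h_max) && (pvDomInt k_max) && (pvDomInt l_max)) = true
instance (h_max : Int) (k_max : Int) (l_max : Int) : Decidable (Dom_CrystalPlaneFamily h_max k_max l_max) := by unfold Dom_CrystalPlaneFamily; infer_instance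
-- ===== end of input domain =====

-- B replaces A's three nested loops + per-element [0,0,0] guard by a single flat
-- loop over ranks 1..H*K*L-1, decoding each rank into (h,k,l) by mixed-radix
-- division/modulo (alternative algorithm, same cost).

-- ===== PORT A =====
def CrystalPlaneFamily (h_max : Int) (k_max : Int) (l_max : Int) : List (List Int) :=
  (PySem.List.pyRange 0 (h_max + 1) 1).foldl (fun acc h =>
    (PySem.List.pyRange 0 (k_max + 1) 1).foldl (fun acc k =>
      (PySem.List.pyRange 0 (l_max + 1) 1).foldl (fun acc l =>
        if ([h, k, l] : List Int) ≠ [0, 0, 0] then acc ++ [[h, k, l]] else acc)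
        acc) acc) []

-- ===== PORT B =====
def CrystalPlaneFamily_alt (h_max : Int) (k_max : Int) (l_max : Int) : List (List Int) :=
  let H := h_max + 1
  let K := k_max + 1
  let L := l_max + 1
  if H ≤ 0 ∨ K ≤ 0 ∨ L ≤ 0 then []
  else
    (PySem.List.pyRange 1 (H * K * L) 1).map (fun i =>
      [PySem.Int.floordiv i (K * L), PySem.Int.mod (PySem.Int.floordiv i L) K, PySem.Int.mod i L])

-- ===== PRECONDITION & SPEC =====
def Spec_CrystalPlaneFamily (h_max : Int) (k_max : Int) (l_max : Int) (out : List (List Int)) : Prop := out = CrystalPlaneFamily_alt h_max k_max l_max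
instance (h_max : Int) (k_max : Int) (l_max : Int) (out : List (List Int)) : Decidable (Spec_CrystalPlaneFamily h_max k_max l_max out) := by unfold Spec_CrystalPlaneFamily; infer_instance

-- ===== CLAIM (what is proved, stated in full; the proofs are below) =====
def Claim_equal_CrystalPlaneFamily : Prop := ∀ (h_max : Int) (k_max : Int) (l_max : Int), Dom_CrystalPlaneFamily h_max k_max l_max → Spec_CrystalPlaneFamily h_max k_max l_max (CrystalPlaneFamily h_max k_max l_max)

-- ===== LEMMAS AND PROOFS =====

-- the unfiltered lexicographic enumeration (proof-side helper)
def pvFull (h_max : Int) (k_max : Int) (l_max : Int) : List (List Int) :=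
  (PySem.List.pyRange 0 (h_max + 1) 1).flatMap (fun h =>
    (PySem.List.pyRange 0 (k_max + 1) 1).flatMap (fun k =>
      (PySem.List.pyRange 0 (l_max + 1) 1).map (fun l => [h, k, l])))

-- A is the filter of the full enumeration
theorem A_eq_filter (h_max k_max l_max : Int) :
    CrystalPlaneFamily h_max k_max l_max
      = (pvFull h_max k_max l_max).filter (fun t => decide (t ≠ [0, 0, 0])) := by
  unfold CrystalPlaneFamily pvFull
  simp [PySem.List.foldl_append_ite, List.flatMap_def, List.filter_flatten,
        List.filter_map, List.map_map, Function.comp_def]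

-- Nat-level mixed-radix collapse of one nesting level
theorem flat2 {α : Type} (K L : Nat) (f : Nat → Nat → α) :
    (List.range K).flatMap (fun (k : Nat) => (List.range L).map (fun (l : Nat) => f k l))
      = (List.range (K * L)).map (fun (i : Nat) => f (i / L) (i % L)) := by
  induction K with
  | zero => simp
  | succ K ih =>
    rw [List.range_succ, List.flatMap_append, ih, Nat.succ_mul, List.range_add,
        List.map_append]
    congr 1
    simp only [List.flatMap_cons, List.flatMap_nil, List.append_nil, List.map_map]
    apply List.map_congr_left
    intro l hl
    have hlL : l < L := List.mem_range.mp hl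
    have hL : 0 < L := by omega
    have h1 : (K * L + l) / L = K := by
      rw [mul_comm, Nat.mul_add_div hL, Nat.div_eq_of_lt hlL, Nat.add_zero]
    have h2 : (K * L + l) % L = l := by
      rw [mul_comm, Nat.mul_add_mod, Nat.mod_eq_of_lt hlL]
    simp [Function.comp, h1, h2]

-- the full enumeration as a flat decoded map (Nat side)
theorem full_eq_map (H K L : Nat) :
    (List.range H).flatMap (fun (h : Nat) => (List.range K).flatMap (fun (k : Nat) =>
      (List.range L).map (fun (l : Nat) => ([(h : Int), (k : Int), (l : Int)] : List Int))))
      = (List.range (H * (K * L))).map (fun (i : Nat) =>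
          ([((i / (K * L) : Nat) : Int), ((i % (K * L) / L : Nat) : Int),
            ((i % (K * L) % L : Nat) : Int)] : List Int)) := by
  have inner : ∀ h : Nat, (List.range K).flatMap (fun (k : Nat) =>
      (List.range L).map (fun (l : Nat) => ([(h : Int), (k : Int), (l : Int)] : List Int)))
      = (List.range (K * L)).map (fun (j : Nat) =>
          ([(h : Int), ((j / L : Nat) : Int), ((j % L : Nat) : Int)] : List Int)) :=
    fun h => flat2 K L (fun k l => ([(h : Int), (k : Int), (l : Int)] : List Int))
  simp only [inner]
  exact flat2 H (K * L) (fun h j =>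
    ([(h : Int), ((j / L : Nat) : Int), ((j % L : Nat) : Int)] : List Int))

theorem CrystalPlaneFamily_spec' (h_max k_max l_max : Int) :
    CrystalPlaneFamily h_max k_max l_max = CrystalPlaneFamily_alt h_max k_max l_max := by
  rw [A_eq_filter]
  unfold CrystalPlaneFamily_alt
  by_cases hdeg : h_max + 1 ≤ 0 ∨ k_max + 1 ≤ 0 ∨ l_max + 1 ≤ 0
  · rcases hdeg with hh | hk | hl
    · simp [pvFull, PySem.List.pyRange_one_eq_nil hh, hh]
    · simp [pvFull, PySem.List.pyRange_one_eq_nil hk, hk, List.flatMap_def]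
    · simp [pvFull, PySem.List.pyRange_one_eq_nil hl, hl, List.flatMap_def]
  · simp only [hdeg, if_false]
    push Not at hdeg
    obtain ⟨hh, hk, hl⟩ := hdeg
    set H : Nat := (h_max + 1).toNat with hH
    set K : Nat := (k_max + 1).toNat with hK
    set L : Nat := (l_max + 1).toNat with hL
    have eh : h_max + 1 = (H : Int) := by omega
    have ek : k_max + 1 = (K : Int) := by omega
    have el : l_max + 1 = (L : Int) := by omega
    have hHp : 0 < H := by omega
    have hKp : 0 < K := by omega
    have hLp : 0 < L := by omega
    -- rewrite pvFull into the Nat-indexed decoded map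
    have efull : pvFull h_max k_max l_max
        = (List.range (H * (K * L))).map (fun (i : Nat) =>
            ([((i / (K * L) : Nat) : Int), ((i % (K * L) / L : Nat) : Int),
              ((i % (K * L) % L : Nat) : Int)] : List Int)) := by
      unfold pvFull
      rw [eh, ek, el, PySem.List.pyRange_zero_nat, PySem.List.pyRange_zero_nat,
          PySem.List.pyRange_zero_nat]
      rw [← full_eq_map H K L]
      simp only [List.flatMap_map, List.map_map, Function.comp_def]
    rw [efull]
    obtain ⟨N, hN⟩ : ∃ N, H * (K * L) = N + 1 :=
      ⟨H * (K * L) - 1, by have := Nat.mul_pos hHp (Nat.mul_pos hKp hLp); omega⟩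
    -- the B side: pyRange 1 (H*K*L) maps over range N shifted by one
    have eB : PySem.List.pyRange 1 ((h_max + 1) * (k_max + 1) * (l_max + 1)) 1
        = (List.range N).map (fun (k : Nat) => (1 : Int) + (k : Int)) := by
      rw [eh, ek, el, PySem.List.pyRange_one]
      congr 2
      have : (H : Int) * K * L = ((H * (K * L) : Nat) : Int) := by push_cast; ring
      rw [this, hN]
      push_cast
      omega
    rw [eB, hN, List.range_succ_eq_map, List.map_cons, List.filter_cons,
        if_neg (by simp), List.map_map]
    rw [List.filter_eq_self.mpr (by
      intro t ht
      obtain ⟨n, -, rfl⟩ := List.mem_map.mp ht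
      simp only [Function.comp_def, Nat.succ_eq_add_one, decide_eq_true_eq, ne_eq,
                 List.cons.injEq, and_true, Nat.cast_eq_zero]
      intro hcontra
      obtain ⟨c1, c3, c2⟩ := hcontra
      have hlt : n + 1 < K * L := by
        rcases Nat.div_eq_zero_iff.mp c1 with h0 | h
        · have := Nat.mul_pos hKp hLp; omega
        · exact h
      rw [Nat.mod_eq_of_lt hlt] at c2 c3
      have hlt2 : n + 1 < L := by
        rcases Nat.div_eq_zero_iff.mp c3 with h0 | h
        · omega
        · exact h
      rw [Nat.mod_eq_of_lt hlt2] at c2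
      omega)]
    simp only [ek, el]
    rw [List.map_map]
    apply List.map_congr_left
    intro n _
    simp only [Function.comp_def, Nat.succ_eq_add_one]
    have e1 : (1 : Int) + (n : Int) = ((n + 1 : Nat) : Int) := by push_cast; ring
    have e2 : ((K : Int)) * L = ((K * L : Nat) : Int) := by push_cast; ring
    rw [e1, e2, PySem.Int.floordiv_natCast, PySem.Int.floordiv_natCast,
        PySem.Int.mod_natCast, PySem.Int.mod_natCast]
    have d1 : (n + 1) % (K * L) / L = (n + 1) / L % K := by
      rw [mul_comm K L, Nat.mod_mul_right_div_self]
    have d2 : (n + 1) % (K * L) % L = (n + 1) % L := by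
      exact Nat.mod_mod_of_dvd _ ⟨K, mul_comm K L⟩
    rw [d1, d2]

-- ===== VERDICT (by name: the statement is the Claim_ definition above) =====
theorem CrystalPlaneFamily_spec : Claim_equal_CrystalPlaneFamily := by
  intro h k l _
  exact CrystalPlaneFamily_spec' h k l
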